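-- pv_equiv track=rewrite | github.com/ulugbekerkinovich2/crm_bot | handlers/users/advertiser_commands.py | wrap_entity
-- ===== SOURCE A (Python) =====
-- from typing import List
--
-- def wrap_entity(text: str, types: List[str], url: str = None) -> str:
--     for t in reversed(types):
--         if t == "bold":
--             text = f"<b>{text}</b>"
--         elif t == "italic":
--             text = f"<i>{text}</i>"
--         elif t == "underline":
--             text = f"<u>{text}</u>"
--         elif t == "strikethrough":
--             text = f"<s>{text}</s>"
--         elif t == "code":
--             text = f"<code>{text}</code>"
--         elif t == "pre":
--             text = f"<pre>{text}</pre>"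
--         elif t == "text_link" and url:
--             text = f"<a href='{url}'>{text}</a>"
--     return text
-- ===== SOURCE B (Python) =====
-- def wrap_entity(text, types, url=None):
--     tags = {
--         "bold": ("<b>", "</b>"),
--         "italic": ("<i>", "</i>"),
--         "underline": ("<u>", "</u>"),
--         "strikethrough": ("<s>", "</s>"),
--         "code": ("<code>", "</code>"),
--         "pre": ("<pre>", "</pre>"),
--     }
--     if url:
--         tags["text_link"] = (f"<a href='{url}'>", "</a>")
--     prefix = "".join(tags[t][0] for t in types if t in tags)
--     suffix = "".join(tags[t][1] for t in reversed(types) if t in tags)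
--     return prefix + text + suffix
-- ===== Notes on version B (the rewrite author's own statement) =====
-- stated objective: alternative
-- what changed: Replaces the reversed rewrapping loop (one if/elif chain per iteration, rebuilding the whole string each step) with a tag-pair table plus two filtered joins: all opening tags are concatenated in one forward pass and all closing tags in one reverse pass around the untouched text.
import Mathlib
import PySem

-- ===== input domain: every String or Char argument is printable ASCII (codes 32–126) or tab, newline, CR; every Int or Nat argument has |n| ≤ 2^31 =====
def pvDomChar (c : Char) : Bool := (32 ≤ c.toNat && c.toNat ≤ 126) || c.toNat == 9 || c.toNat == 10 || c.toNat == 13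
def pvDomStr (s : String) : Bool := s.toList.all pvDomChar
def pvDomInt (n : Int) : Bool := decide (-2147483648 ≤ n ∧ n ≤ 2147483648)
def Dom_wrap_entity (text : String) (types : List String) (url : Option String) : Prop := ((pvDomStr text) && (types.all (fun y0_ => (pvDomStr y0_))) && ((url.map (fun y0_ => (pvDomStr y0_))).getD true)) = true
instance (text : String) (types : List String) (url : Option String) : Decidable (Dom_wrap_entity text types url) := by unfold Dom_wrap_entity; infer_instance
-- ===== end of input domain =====

set_option maxHeartbeats 800000
set_option maxRecDepth 8000


-- B replaces A's reversed rewrapping loop by a tag-pair table and two filtered joins (alternative decomposition, same cost class).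

-- ===== PORT A =====
-- `url` truthiness of Python's `and url` (None and "" are falsy)
def pvUrlTruthyA (url : Option String) : Bool :=
  match url with
  | some u => u != ""
  | none => false

-- one iteration of A's loop body (the if/elif chain), accumulator = text
def pvWrapStepA (url : Option String) (text : String) (t : String) : String :=
  if t == "bold" then "<b>" ++ text ++ "</b>"
  else if t == "italic" then "<i>" ++ text ++ "</i>"
  else if t == "underline" then "<u>" ++ text ++ "</u>"
  else if t == "strikethrough" then "<s>" ++ text ++ "</s>"
  else if t == "code" then "<code>" ++ text ++ "</code>"
  else if t == "pre" then "<pre>" ++ text ++ "</pre>"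
  else if t == "text_link" && pvUrlTruthyA url then "<a href='" ++ url.getD "" ++ "'>" ++ text ++ "</a>"
  else text

def wrap_entity (text : String) (types : List String) (url : Option String) : String :=
  (types.reverse).foldl (pvWrapStepA url) text

-- ===== PORT B =====
def pvUrlTruthyB (url : Option String) : Bool :=
  match url with
  | some u => u != ""
  | none => false

-- the `tags` dict of Source B
def pvTags (url : Option String) : PySem.Dict String (String × String) :=
  let d := ((((((PySem.Dict.empty.insert "bold" ("<b>", "</b>")).insert
      "italic" ("<i>", "</i>")).insert
      "underline" ("<u>", "</u>")).insert
      "strikethrough" ("<s>", "</s>")).insert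
      "code" ("<code>", "</code>")).insert
      "pre" ("<pre>", "</pre>"))
  if pvUrlTruthyB url then d.insert "text_link" ("<a href='" ++ url.getD "" ++ "'>", "</a>") else d

def wrap_entity_alt (text : String) (types : List String) (url : Option String) : String :=
  let tags := pvTags url
  let pre := PySem.Str.join "" (types.filterMap (fun t => (tags.get? t).map (·.1)))
  let suf := PySem.Str.join "" (types.reverse.filterMap (fun t => (tags.get? t).map (·.2)))
  pre ++ text ++ suf

-- ===== PRECONDITION & SPEC =====
def Spec_wrap_entity (text : String) (types : List String) (url : Option String) (out : String) : Prop := out = wrap_entity_alt text types url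
instance (text : String) (types : List String) (url : Option String) (out : String) : Decidable (Spec_wrap_entity text types url out) := by unfold Spec_wrap_entity; infer_instance

-- ===== CLAIM (what is proved, stated in full; the proofs are below) =====
def Claim_equal_wrap_entity : Prop := ∀ (text : String) (types : List String) (url : Option String), Dom_wrap_entity text types url → Spec_wrap_entity text types url (wrap_entity text types url)

-- ===== LEMMAS AND PROOFS =====

-- proof-side view of the tag table: the (open, close) pair a type name selects, if any
def pvPairOf (url : Option String) (t : String) : Option (String × String) :=
  if t == "bold" then some ("<b>", "</b>")
  else if t == "italic" then some ("<i>", "</i>")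
  else if t == "underline" then some ("<u>", "</u>")
  else if t == "strikethrough" then some ("<s>", "</s>")
  else if t == "code" then some ("<code>", "</code>")
  else if t == "pre" then some ("<pre>", "</pre>")
  else if t == "text_link" && pvUrlTruthyA url then some ("<a href='" ++ url.getD "" ++ "'>", "</a>")
  else none

theorem pvTags_get? (url : Option String) (t : String) :
    (pvTags url).get? t = pvPairOf url t := by
  have hAB : pvUrlTruthyB url = pvUrlTruthyA url := rfl
  unfold pvTags pvPairOf
  cases h : pvUrlTruthyA url <;>
    simp [hAB, h, PySem.Dict.get?_insert, PySem.Dict.get?_empty, beq_iff_eq] <;>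
    split_ifs <;> simp_all

theorem pvWrapStepA_pair (url : Option String) (s t : String) :
    pvWrapStepA url s t =
      match pvPairOf url t with
      | some (o, c) => o ++ s ++ c
      | none => s := by
  unfold pvWrapStepA pvPairOf
  split_ifs <;> rfl

theorem pvJoin_empty_flatten (parts : List String) :
    (PySem.Str.join "" parts).toList = (parts.map String.toList).flatten := by
  induction parts with
  | nil => simp [PySem.Str.toList_join, PySem.Chars.join_nil]
  | cons a l ih =>
    cases l with
    | nil => simp [PySem.Str.toList_join, PySem.Chars.join_singleton]
    | cons b r =>
      rw [List.map_cons, List.flatten_cons, ← ih]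
      simp [PySem.Str.toList_join, PySem.Chars.join_cons_cons]

-- invariant of A's loop, at the character-list level
theorem pvWrap_invariant (url : Option String) (types : List String) (text : String) :
    ((types.reverse).foldl (pvWrapStepA url) text).toList =
      ((types.filterMap (fun t => (pvPairOf url t).map (·.1))).map String.toList).flatten
        ++ text.toList
        ++ ((types.reverse.filterMap (fun t => (pvPairOf url t).map (·.2))).map String.toList).flatten := by
  induction types with
  | nil => simp
  | cons t ts ih =>
    rw [List.reverse_cons, List.foldl_append, List.foldl_cons, List.foldl_nil, pvWrapStepA_pair]
    cases h : pvPairOf url t with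
    | none =>
      simp only [h, List.filterMap_cons, Option.map_none,
        List.filterMap_append, List.filterMap_nil, List.append_nil, ih]
    | some oc =>
      obtain ⟨o, c⟩ := oc
      simp only [h, String.toList_append, ih, List.filterMap_cons, Option.map_some,
        List.map_cons, List.flatten_cons, List.filterMap_append,
        List.filterMap_nil, List.map_append, List.flatten_append, List.map_nil,
        List.flatten_nil, List.append_nil, List.append_assoc]

-- ===== VERDICT (by name: the statement is the Claim_ definition above) =====
theorem wrap_entity_spec : Claim_equal_wrap_entity := by
  intro text types url _
  unfold Spec_wrap_entity wrap_entity wrap_entity_alt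
  apply String.toList_injective
  simp only [String.toList_append, pvJoin_empty_flatten, pvTags_get?]
  exact pvWrap_invariant url types text
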